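-- pv_equiv track=rewrite | github.com/yg-ht/azure-assess | azure_findings_shared.py | build_user_registration_lookup
-- ===== SOURCE A (Python) =====
-- def normalize_text(value):
--     if value is None:
--         return ""
--     return str(value).strip().lower()
--
-- def registration_detail_maps(registration_details):
--     by_id = {}
--     by_upn = {}
--     for item in registration_details:
--         user_id = normalize_text(item.get("id") or item.get("userId"))
--         if user_id:
--             by_id[user_id] = item
--         upn = normalize_text(item.get("userPrincipalName"))
--         if upn:
--             by_upn[upn] = item
--     return by_id, by_upn
--
-- def build_user_registration_lookup(ad_users, registration_details):
--     by_id, by_upn = registration_detail_maps(registration_details)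
--     lookup = {}
--     for user in ad_users:
--         user_id = normalize_text(user.get("id"))
--         upn = normalize_text(user.get("userPrincipalName"))
--         lookup[user_id] = by_id.get(user_id) or by_upn.get(upn)
--     return lookup
-- ===== SOURCE B (Python) =====
-- def normalize_text(value):
--     if value is None:
--         return ""
--     return str(value).strip().lower()
--
--
-- def build_user_registration_lookup(ad_users, registration_details):
--     # Index-free: for each user, scan registration_details directly, keeping
--     # the LAST matching item (id match first, then userPrincipalName match).
--     lookup = {}
--     for user in ad_users:
--         user_id = normalize_text(user.get("id"))
--         upn = normalize_text(user.get("userPrincipalName"))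
--         match = None
--         if user_id:
--             for item in registration_details:
--                 if normalize_text(item.get("id") or item.get("userId")) == user_id:
--                     match = item
--         if match is None and upn:
--             for item in registration_details:
--                 if normalize_text(item.get("userPrincipalName")) == upn:
--                     match = item
--         lookup[user_id] = match
--     return lookup
-- ===== Notes on version B (the rewrite author's own statement) =====
-- stated objective: alternative
-- what changed: B drops the precomputed by_id/by_upn dictionaries and instead, per AD user, scans registration_details directly keeping the last id match (falling back to the last userPrincipalName match), building the same lookup.
import Mathlib
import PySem

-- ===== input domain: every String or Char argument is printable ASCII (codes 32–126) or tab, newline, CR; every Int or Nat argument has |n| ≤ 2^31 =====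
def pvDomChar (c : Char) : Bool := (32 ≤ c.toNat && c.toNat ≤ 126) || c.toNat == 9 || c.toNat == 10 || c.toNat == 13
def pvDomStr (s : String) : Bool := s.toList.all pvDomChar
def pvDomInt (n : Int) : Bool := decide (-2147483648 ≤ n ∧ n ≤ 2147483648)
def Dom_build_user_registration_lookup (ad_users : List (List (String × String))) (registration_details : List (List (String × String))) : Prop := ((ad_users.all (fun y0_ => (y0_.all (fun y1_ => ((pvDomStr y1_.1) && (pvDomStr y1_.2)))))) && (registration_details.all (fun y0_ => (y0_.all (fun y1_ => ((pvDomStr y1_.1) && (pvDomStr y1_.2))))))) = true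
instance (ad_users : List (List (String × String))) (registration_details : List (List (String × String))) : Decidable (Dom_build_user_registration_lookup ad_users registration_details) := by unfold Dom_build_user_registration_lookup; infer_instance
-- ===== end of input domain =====

-- B replaces A's precomputed by_id/by_upn dictionaries with direct last-match scans of
-- registration_details per AD user (alternative decomposition, same results).

-- Shared Python-semantics helpers (used verbatim by both Pythons):
-- item.get(k) on a dict given as an association list
def pvGet (d : List (String × String)) (k : String) : Option String :=
  (PySem.Dict.mk d).get? k

-- normalize_text(value): "" for None, else str(value).strip().lower()
def pvNorm (v : Option String) : String :=
  match v with
  | none => ""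
  | some s => PySem.Str.lower (PySem.Str.strip s)

-- item.get("id") or item.get("userId")  (Python `or`: None and "" are falsy)
def pvIdOrUserId (item : List (String × String)) : Option String :=
  match pvGet item "id" with
  | some s => if s = "" then pvGet item "userId" else some s
  | none => pvGet item "userId"

-- normalize_text(item.get("id") or item.get("userId"))
def pvKeyId (item : List (String × String)) : String := pvNorm (pvIdOrUserId item)
-- normalize_text(item.get("userPrincipalName"))
def pvKeyUpn (item : List (String × String)) : String := pvNorm (pvGet item "userPrincipalName")

-- ===== PORT A =====
def registration_detail_maps (registration_details : List (List (String × String))) :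
    PySem.Dict String (List (String × String)) × PySem.Dict String (List (String × String)) :=
  registration_details.foldl (fun m item =>
    let user_id := pvKeyId item
    let by_id := if user_id ≠ "" then m.1.insert user_id item else m.1
    let upn := pvKeyUpn item
    let by_upn := if upn ≠ "" then m.2.insert upn item else m.2
    (by_id, by_upn)) (PySem.Dict.empty, PySem.Dict.empty)

def build_user_registration_lookup (ad_users : List (List (String × String))) (registration_details : List (List (String × String))) : List (String × Option (List (String × String))) :=
  let maps := registration_detail_maps registration_details
  let by_id := maps.1
  let by_upn := maps.2
  (ad_users.foldl (fun (lookup : PySem.Dict String (Option (List (String × String)))) user =>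
    let user_id := pvNorm (pvGet user "id")
    let upn := pvNorm (pvGet user "userPrincipalName")
    -- by_id.get(user_id) or by_upn.get(upn): a found but EMPTY dict is falsy in Python
    let v := match by_id.get? user_id with
      | some item => if item = [] then by_upn.get? upn else some item
      | none => by_upn.get? upn
    lookup.insert user_id v) PySem.Dict.empty).items

-- ===== PORT B =====
def build_user_registration_lookup_alt (ad_users : List (List (String × String))) (registration_details : List (List (String × String))) : List (String × Option (List (String × String))) :=
  (ad_users.foldl (fun (lookup : PySem.Dict String (Option (List (String × String)))) user =>
    let user_id := pvNorm (pvGet user "id")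
    let upn := pvNorm (pvGet user "userPrincipalName")
    let m0 : Option (List (String × String)) :=
      if user_id ≠ "" then
        registration_details.foldl (fun acc item =>
          if pvKeyId item = user_id then some item else acc) none
      else none
    let m : Option (List (String × String)) :=
      match m0 with
      | some it => some it
      | none =>
        if upn ≠ "" then
          registration_details.foldl (fun acc item =>
            if pvKeyUpn item = upn then some item else acc) none
        else none
    lookup.insert user_id m) PySem.Dict.empty).items

-- ===== PRECONDITION & SPEC =====
def Spec_build_user_registration_lookup (ad_users : List (List (String × String))) (registration_details : List (List (String × String))) (out : List (String × Option (List (String × String)))) : Prop := out = build_user_registration_lookup_alt ad_users registration_details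
instance (ad_users : List (List (String × String))) (registration_details : List (List (String × String))) (out : List (String × Option (List (String × String)))) : Decidable (Spec_build_user_registration_lookup ad_users registration_details out) := by unfold Spec_build_user_registration_lookup; infer_instance

-- ===== CLAIM (what is proved, stated in full; the proofs are below) =====
def Claim_equal_build_user_registration_lookup : Prop := ∀ (ad_users : List (List (String × String))) (registration_details : List (List (String × String))), Dom_build_user_registration_lookup ad_users registration_details → Spec_build_user_registration_lookup ad_users registration_details (build_user_registration_lookup ad_users registration_details)

-- ===== LEMMAS AND PROOFS =====

-- the pair fold of registration_detail_maps splits into two independent dictionary folds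
lemma pvMaps_split (rd : List (List (String × String)))
    (d1 d2 : PySem.Dict String (List (String × String))) :
    rd.foldl (fun m item =>
      let user_id := pvKeyId item
      let by_id := if user_id ≠ "" then m.1.insert user_id item else m.1
      let upn := pvKeyUpn item
      let by_upn := if upn ≠ "" then m.2.insert upn item else m.2
      (by_id, by_upn)) (d1, d2)
    = (rd.foldl (fun d item => if pvKeyId item ≠ "" then d.insert (pvKeyId item) item else d) d1,
       rd.foldl (fun d item => if pvKeyUpn item ≠ "" then d.insert (pvKeyUpn item) item else d) d2) := by
  induction rd generalizing d1 d2 with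
  | nil => rfl
  | cons it rest ih => simp only [List.foldl_cons, ih]

-- looking up k ≠ "" in the last-wins dictionary fold equals the last-match scan
lemma pvGet_fold_insert (key : List (String × String) → String)
    (rd : List (List (String × String))) (d : PySem.Dict String (List (String × String)))
    (k : String) (hk : k ≠ "") :
    (rd.foldl (fun d item => if key item ≠ "" then d.insert (key item) item else d) d).get? k
    = rd.foldl (fun acc item => if key item = k then some item else acc) (d.get? k) := by
  induction rd generalizing d with
  | nil => rfl
  | cons it rest ih =>
    simp only [List.foldl_cons]
    rw [ih]
    congr 1
    by_cases h : key it = k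
    · subst h
      simp [hk, PySem.Dict.get?_insert_self]
    · by_cases h2 : key it ≠ ""
      · rw [if_pos h2, if_neg h, PySem.Dict.get?_insert_of_ne _ _ (fun he => h he.symm)]
      · rw [if_neg h2, if_neg h]

-- nothing is ever stored under the empty key
lemma pvGet_fold_insert_empty (key : List (String × String) → String)
    (rd : List (List (String × String))) (d : PySem.Dict String (List (String × String)))
    (hd : d.get? "" = none) :
    (rd.foldl (fun d item => if key item ≠ "" then d.insert (key item) item else d) d).get? "" = none := by
  induction rd generalizing d with
  | nil => exact hd
  | cons it rest ih =>
    simp only [List.foldl_cons]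
    apply ih
    by_cases h : key it = ""
    · simp [h, hd]
    · rw [if_pos h]
      rw [PySem.Dict.get?_insert_of_ne _ _ (fun he => h he.symm)]
      exact hd

-- a successful last-match scan returns an item whose key is the searched key
lemma pvScan_key (key : List (String × String) → String)
    (rd : List (List (String × String))) (k : String) (a : Option (List (String × String)))
    (ha : ∀ it, a = some it → key it = k) (it : List (String × String))
    (h : rd.foldl (fun acc item => if key item = k then some item else acc) a = some it) :
    key it = k := by
  induction rd generalizing a with
  | nil => exact ha it h
  | cons x rest ih =>
    simp only [List.foldl_cons] at h
    apply ih _ _ h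
    intro it' h'
    by_cases hx : key x = k
    · simp [hx] at h'; subst h'; exact hx
    · simp [hx] at h'; exact ha it' h'

lemma pvKeyId_nil : pvKeyId [] = "" := by decide

-- pointwise: A's value for one user equals B's value for that user
lemma pvValue_eq (registration_details : List (List (String × String))) (user_id upn : String) :
    (match (registration_detail_maps registration_details).1.get? user_id with
      | some item => if item = [] then (registration_detail_maps registration_details).2.get? upn else some item
      | none => (registration_detail_maps registration_details).2.get? upn)
    = (match (if user_id ≠ "" then
          registration_details.foldl (fun acc item =>
            if pvKeyId item = user_id then some item else acc) none
        else none) with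
      | some it => some it
      | none =>
        if upn ≠ "" then
          registration_details.foldl (fun acc item =>
            if pvKeyUpn item = upn then some item else acc) none
        else none) := by
  have hsplit := pvMaps_split registration_details PySem.Dict.empty PySem.Dict.empty
  have h1 : (registration_detail_maps registration_details).1
      = registration_details.foldl (fun d item => if pvKeyId item ≠ "" then d.insert (pvKeyId item) item else d) PySem.Dict.empty := by
    unfold registration_detail_maps; rw [hsplit]
  have h2 : (registration_detail_maps registration_details).2
      = registration_details.foldl (fun d item => if pvKeyUpn item ≠ "" then d.insert (pvKeyUpn item) item else d) PySem.Dict.empty := by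
    unfold registration_detail_maps; rw [hsplit]
  have hupn : (registration_detail_maps registration_details).2.get? upn
      = (if upn ≠ "" then
          registration_details.foldl (fun acc item =>
            if pvKeyUpn item = upn then some item else acc) none
        else none) := by
    by_cases hu : upn = ""
    · subst hu
      rw [h2, if_neg (by simp)]
      exact pvGet_fold_insert_empty _ _ _ rfl
    · rw [h2, if_pos hu, pvGet_fold_insert _ _ _ _ hu]
      rfl
  by_cases hid : user_id = ""
  · subst hid
    have : (registration_detail_maps registration_details).1.get? "" = none := by
      rw [h1]; exact pvGet_fold_insert_empty _ _ _ rfl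
    rw [this, if_neg (by simp)]
    exact hupn
  · rw [h1, pvGet_fold_insert _ _ _ _ hid]
    rw [if_pos hid]
    cases hscan : registration_details.foldl (fun acc item =>
        if pvKeyId item = user_id then some item else acc) (PySem.Dict.empty.get? user_id) with
    | none =>
      have : (PySem.Dict.empty : PySem.Dict String (List (String × String))).get? user_id = none := rfl
      rw [this] at hscan
      rw [hscan]
      exact hupn
    | some it =>
      have hkey : pvKeyId it = user_id :=
        pvScan_key pvKeyId registration_details user_id _ (by intro it' h'; simp at h') it hscan
      have hne : it ≠ [] := by
        intro he; rw [he, pvKeyId_nil] at hkey; exact hid hkey.symm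
      have : (PySem.Dict.empty : PySem.Dict String (List (String × String))).get? user_id = none := rfl
      rw [this] at hscan
      rw [hscan]
      simp [hne]

-- ===== VERDICT (by name: the statement is the Claim_ definition above) =====
theorem build_user_registration_lookup_spec : Claim_equal_build_user_registration_lookup := by
  intro ad_users registration_details _
  unfold Spec_build_user_registration_lookup
  unfold build_user_registration_lookup build_user_registration_lookup_alt
  refine congrArg PySem.Dict.items ?_
  apply PySem.List.foldl_congr_mem
  intro lookup user _
  exact congrArg (lookup.insert (pvNorm (pvGet user "id")))
    (pvValue_eq registration_details (pvNorm (pvGet user "id")) (pvNorm (pvGet user "userPrincipalName")))
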